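-- pv_equiv track=rewrite | github.com/erturkmemmedli/Leet-Code-Solutions | 0835_largestOverlap.py | c
-- ===== SOURCE A (Python) =====
-- from typing import List
--
-- from collections import defaultdict
--
-- def c(img1: List[List[int]], img2: List[List[int]]) -> int:
--     n = len(img1)
--     pix1 = []
--     pix2 = []
--     for i in range(n):
--         for j in range(n):
--             if img1[i][j]: pix1.append((i,j))
--             if img2[i][j]: pix2.append((i,j))
--     directions = defaultdict(int)
--     for a, b in pix1:
--         for c, d in pix2:
--             directions[(a-c, b-d)] += 1
--     return max(directions.values()) if directions else 0
-- ===== SOURCE B (Python) =====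
-- from typing import List
--
-- def c(img1: List[List[int]], img2: List[List[int]]) -> int:
--     n = len(img1)
--     best = 0
--     for dx in range(-(n - 1), n):
--         for dy in range(-(n - 1), n):
--             cnt = 0
--             for i in range(n):
--                 for j in range(n):
--                     if img2[i][j] and 0 <= i + dx < n and 0 <= j + dy < n and img1[i + dx][j + dy]:
--                         cnt += 1
--             best = max(best, cnt)
--     return best
-- ===== Notes on version B (the rewrite author's own statement) =====
-- stated objective: simpler
-- what changed: B drops A's pixel-coordinate lists and difference-vector counting dict entirely: it enumerates every translation (dx,dy) directly and counts the overlapping nonzero cells with plain nested loops, keeping a running maximum.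
import Mathlib
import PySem

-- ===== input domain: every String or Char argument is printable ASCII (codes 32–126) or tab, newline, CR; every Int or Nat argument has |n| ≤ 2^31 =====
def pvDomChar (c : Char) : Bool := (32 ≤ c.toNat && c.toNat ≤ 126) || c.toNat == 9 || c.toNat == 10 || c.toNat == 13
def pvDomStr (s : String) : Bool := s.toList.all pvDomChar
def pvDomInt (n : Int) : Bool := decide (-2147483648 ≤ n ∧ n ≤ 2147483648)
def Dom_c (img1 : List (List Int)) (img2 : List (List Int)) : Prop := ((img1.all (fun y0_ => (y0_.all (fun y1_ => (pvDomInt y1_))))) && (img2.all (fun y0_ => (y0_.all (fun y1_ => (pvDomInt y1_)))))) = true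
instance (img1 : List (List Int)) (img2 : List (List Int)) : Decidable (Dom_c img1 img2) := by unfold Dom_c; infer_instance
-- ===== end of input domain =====

-- B replaces A's pixel lists and difference-vector dict by a direct enumeration of all
-- translations with a running maximum (objective: simpler; same worst-case cost).

-- ===== PORT A =====
def c (img1 : List (List Int)) (img2 : List (List Int)) : Int :=
  let n : Int := (img1.length : Int)
  let pp : List (Int × Int) × List (Int × Int) :=
    (PySem.List.pyRange 0 n).foldl (fun p i =>
      (PySem.List.pyRange 0 n).foldl (fun (p : List (Int × Int) × List (Int × Int)) j =>
        ((if PySem.List.pyGetD (PySem.List.pyGetD img1 i []) j 0 ≠ 0 then p.1 ++ [(i, j)] else p.1),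
         (if PySem.List.pyGetD (PySem.List.pyGetD img2 i []) j 0 ≠ 0 then p.2 ++ [(i, j)] else p.2))) p)
      ([], [])
  let directions : PySem.Dict (Int × Int) Int :=
    pp.1.foldl (fun d ab => pp.2.foldl (fun d cd => d.modify (ab.1 - cd.1, ab.2 - cd.2) 0 (· + 1)) d)
      PySem.Dict.empty
  match PySem.List.max? directions.values (fun x => x) with
  | some m => m
  | none => 0

-- ===== PORT B =====
def c_alt (img1 : List (List Int)) (img2 : List (List Int)) : Int :=
  let n : Int := (img1.length : Int)
  (PySem.List.pyRange (-(n - 1)) n).foldl (fun best dx =>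
    (PySem.List.pyRange (-(n - 1)) n).foldl (fun best dy =>
      let cnt : Int :=
        (PySem.List.pyRange 0 n).foldl (fun cnt i =>
          (PySem.List.pyRange 0 n).foldl (fun cnt j =>
            if PySem.List.pyGetD (PySem.List.pyGetD img2 i []) j 0 ≠ 0 ∧
               0 ≤ i + dx ∧ i + dx < n ∧ 0 ≤ j + dy ∧ j + dy < n ∧
               PySem.List.pyGetD (PySem.List.pyGetD img1 (i + dx) []) (j + dy) 0 ≠ 0
            then cnt + 1 else cnt) cnt) 0
      max best cnt) best) 0

-- ===== PRECONDITION & SPEC =====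
-- Pre_c holds exactly where the Python A returns: every index img1[i][j] / img2[i][j]
-- with 0 ≤ i, j < len(img1) is in range (otherwise A raises IndexError).
def Pre_c (img1 : List (List Int)) (img2 : List (List Int)) : Prop :=
  img1.length ≤ img2.length ∧ (∀ row ∈ img1, img1.length ≤ row.length) ∧
    (∀ row ∈ img2.take img1.length, img1.length ≤ row.length)
instance (img1 : List (List Int)) (img2 : List (List Int)) : Decidable (Pre_c img1 img2) := by
  unfold Pre_c; infer_instance

def pvWitness_c : List (List Int) × List (List Int) := ([[1, 0], [0, 1]], [[0, 1], [1, 0]])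

def Spec_c (img1 : List (List Int)) (img2 : List (List Int)) (out : Int) : Prop := out = c_alt img1 img2
instance (img1 : List (List Int)) (img2 : List (List Int)) (out : Int) : Decidable (Spec_c img1 img2 out) := by unfold Spec_c; infer_instance

-- ===== CLAIM (what is proved, stated in full; the proofs are below) =====
def Claim_equal_c : Prop := ∀ (img1 : List (List Int)) (img2 : List (List Int)), Dom_c img1 img2 → Pre_c img1 img2 → Spec_c img1 img2 (c img1 img2)

-- ===== LEMMAS AND PROOFS =====

-- value of img[i][j] as both ports read it (0 if out of range)
def valAt (img : List (List Int)) (i j : Int) : Int :=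
  PySem.List.pyGetD (PySem.List.pyGetD img i []) j 0

-- the list of nonzero-pixel coordinates, as A builds it
def pixL (img : List (List Int)) (n : Int) : List (Int × Int) :=
  (PySem.List.pyRange 0 n).flatMap (fun i =>
    ((PySem.List.pyRange 0 n).filter (fun j => decide (valAt img i j ≠ 0))).map (fun j => (i, j)))

-- the multiset of difference vectors A counts
def diffsL (img1 img2 : List (List Int)) (n : Int) : List (Int × Int) :=
  (pixL img1 n).flatMap (fun ab => (pixL img2 n).map (fun cd => (ab.1 - cd.1, ab.2 - cd.2)))

-- the grid of translations B scans
def gridL (n : Int) : List (Int × Int) :=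
  (PySem.List.pyRange (-(n - 1)) n).flatMap (fun dx =>
    (PySem.List.pyRange (-(n - 1)) n).map (fun dy => (dx, dy)))

lemma prod_foldl2 {σ : Type} (R S : List Int) (f g : σ → Int → Int → σ) (x y : σ) :
    R.foldl (fun p i => S.foldl (fun p j => (f p.1 i j, g p.2 i j)) p) (x, y)
      = (R.foldl (fun a i => S.foldl (fun a j => f a i j) a) x,
         R.foldl (fun a i => S.foldl (fun a j => g a i j) a) y) := by
  induction R generalizing x y with
  | nil => rfl
  | cons i R ih =>
      simp only [List.foldl_cons]
      rw [PySem.List.foldl_prod_mk (f := fun a j => f a i j) (g := fun a j => g a i j), ih]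

lemma mem_pixL (img : List (List Int)) (n : Int) (t : Int × Int) :
    t ∈ pixL img n ↔ (0 ≤ t.1 ∧ t.1 < n ∧ 0 ≤ t.2 ∧ t.2 < n ∧ valAt img t.1 t.2 ≠ 0) := by
  obtain ⟨x, y⟩ := t
  simp only [pixL, List.mem_flatMap, List.mem_map, List.mem_filter,
    PySem.List.mem_pyRange_one, Prod.mk.injEq, decide_eq_true_eq]
  constructor
  · rintro ⟨i, hi, j, hj, rfl, rfl⟩
    exact ⟨hi.1, hi.2, hj.1.1, hj.1.2, hj.2⟩
  · rintro ⟨h1, h2, h3, h4, h5⟩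
    exact ⟨x, ⟨h1, h2⟩, y, ⟨⟨h3, h4⟩, h5⟩, rfl, rfl⟩

lemma nodup_pixL (img : List (List Int)) (n : Int) : (pixL img n).Nodup := by
  unfold pixL
  rw [List.nodup_flatMap]
  constructor
  · intro i _
    exact ((PySem.List.nodup_pyRange_one 0 n).filter _).map (by intro a b h; simpa using h)
  · refine List.Pairwise.imp ?_ ((PySem.List.nodup_pyRange_one 0 n))
    intro a b hab t ht ht'
    simp only [List.mem_map] at ht ht'
    obtain ⟨j, _, rfl⟩ := ht
    obtain ⟨j', _, h⟩ := ht'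
    exact hab (congrArg Prod.fst h).symm

lemma mem_gridL (n : Int) (k : Int × Int) :
    k ∈ gridL n ↔ (-(n - 1) ≤ k.1 ∧ k.1 < n ∧ -(n - 1) ≤ k.2 ∧ k.2 < n) := by
  obtain ⟨x, y⟩ := k
  simp only [gridL, List.mem_flatMap, List.mem_map, PySem.List.mem_pyRange_one, Prod.mk.injEq]
  constructor
  · rintro ⟨dx, hdx, dy, hdy, rfl, rfl⟩
    exact ⟨hdx.1, hdx.2, hdy.1, hdy.2⟩
  · rintro ⟨h1, h2, h3, h4⟩
    exact ⟨x, ⟨h1, h2⟩, y, ⟨h3, h4⟩, rfl, rfl⟩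

lemma diffs_mem_grid (img1 img2 : List (List Int)) (n : Int) (k : Int × Int)
    (hk : k ∈ diffsL img1 img2 n) : k ∈ gridL n := by
  simp only [diffsL, List.mem_flatMap, List.mem_map] at hk
  obtain ⟨ab, hab, cd, hcd, rfl⟩ := hk
  rw [mem_pixL] at hab hcd
  rw [mem_gridL]
  constructor
  · omega
  constructor
  · omega
  constructor
  · omega
  · omega

lemma sum_flatMap {α : Type} (l : List α) (f : α → List Nat) :
    (List.flatMap f l).sum = (l.map (fun x => (f x).sum)).sum := by
  induction l with
  | nil => rfl
  | cons a t ih => simp [List.flatMap_cons, ih]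

lemma sum_ite_eq_countP {β : Type} (p : β → Bool) (l : List β) :
    (l.map (fun b => if p b = true then (1 : Nat) else 0)).sum = l.countP p := by
  induction l with
  | nil => rfl
  | cons b t ih =>
      simp only [List.map_cons, List.sum_cons, List.countP_cons, ← ih]
      cases p b <;> simp [Nat.add_comm]

-- exchange of the two counting orders
lemma sum_countP_swap {α β : Type} (l1 : List α) (l2 : List β) (q : α → β → Bool) :
    (l1.map (fun a => l2.countP (q a))).sum = (l2.map (fun b => l1.countP (fun a => q a b))).sum := by
  induction l1 with
  | nil => simp
  | cons a l1 ih =>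
      simp only [List.map_cons, List.sum_cons, List.countP_cons, ih]
      rw [show (fun b => List.countP (fun a => q a b) l1 + if q a b = true then 1 else 0)
            = fun b => (List.countP (fun a => q a b) l1) + (if q a b = true then 1 else 0) from rfl,
          List.sum_map_add]
      have := sum_ite_eq_countP (q a) l2
      omega

-- B's inner double loop counts exactly the multiplicity of (dx,dy) among A's difference vectors
lemma cnt_eq (img1 img2 : List (List Int)) (n : Int) (dx dy : Int) :
    (PySem.List.pyRange 0 n).foldl (fun cnt i =>
        (PySem.List.pyRange 0 n).foldl (fun cnt j =>
          if valAt img2 i j ≠ 0 ∧ 0 ≤ i + dx ∧ i + dx < n ∧ 0 ≤ j + dy ∧ j + dy < n ∧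
             valAt img1 (i + dx) (j + dy) ≠ 0
          then cnt + 1 else cnt) cnt) (0 : Int)
      = ((diffsL img1 img2 n).count (dx, dy) : Int) := by
  -- RHS: unfold to a sum over pix2 of indicators
  have hR : (diffsL img1 img2 n).count (dx, dy)
      = ((pixL img2 n).map (fun cd =>
          if (0 ≤ cd.1 + dx ∧ cd.1 + dx < n ∧ 0 ≤ cd.2 + dy ∧ cd.2 + dy < n ∧
              valAt img1 (cd.1 + dx) (cd.2 + dy) ≠ 0) then (1 : Nat) else 0)).sum := by
    rw [diffsL, List.count_flatMap]
    have h1 : ∀ ab : Int × Int,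
        ((pixL img2 n).map (fun cd => (ab.1 - cd.1, ab.2 - cd.2))).count (dx, dy)
          = (pixL img2 n).countP (fun cd => decide ((ab.1 - cd.1, ab.2 - cd.2) = (dx, dy))) := by
      intro ab
      rw [List.count_eq_countP, List.countP_map]
      exact List.countP_congr (by intro cd _; simp)
    calc (List.map (List.count (dx, dy) ∘ fun ab => List.map (fun cd => (ab.1 - cd.1, ab.2 - cd.2)) (pixL img2 n)) (pixL img1 n)).sum
        = ((pixL img1 n).map (fun ab => (pixL img2 n).countP
            (fun cd => decide ((ab.1 - cd.1, ab.2 - cd.2) = (dx, dy))))).sum := by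
          exact congrArg List.sum (by simp only [Function.comp_def]; exact List.map_congr_left (fun ab _ => h1 ab))
      _ = ((pixL img2 n).map (fun cd => (pixL img1 n).countP
            (fun ab => decide ((ab.1 - cd.1, ab.2 - cd.2) = (dx, dy))))).sum := by
          exact sum_countP_swap _ _ _
      _ = _ := by
          refine congrArg List.sum (List.map_congr_left ?_)
          intro cd _
          have : (pixL img1 n).countP (fun ab => decide ((ab.1 - cd.1, ab.2 - cd.2) = (dx, dy)))
              = (pixL img1 n).count (cd.1 + dx, cd.2 + dy) := by
            rw [List.count_eq_countP]
            refine List.countP_congr ?_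
            intro ab _
            simp only [decide_eq_true_eq, beq_iff_eq, Prod.ext_iff]
            omega
          rw [this, (nodup_pixL img1 n).count]
          exact if_congr (mem_pixL img1 n _) rfl rfl
  rw [hR]
  simp only [PySem.List.foldl_ite_add_one]
  rw [PySem.List.foldl_add]
  have hB : ((pixL img2 n).map (fun cd =>
        if (0 ≤ cd.1 + dx ∧ cd.1 + dx < n ∧ 0 ≤ cd.2 + dy ∧ cd.2 + dy < n ∧
            valAt img1 (cd.1 + dx) (cd.2 + dy) ≠ 0) then (1 : Nat) else 0)).sum
      = ((PySem.List.pyRange 0 n).map (fun i => (PySem.List.pyRange 0 n).countP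
          (fun j => decide (valAt img2 i j ≠ 0 ∧ 0 ≤ i + dx ∧ i + dx < n ∧ 0 ≤ j + dy ∧ j + dy < n ∧
            valAt img1 (i + dx) (j + dy) ≠ 0)))).sum := by
    unfold pixL
    rw [List.map_flatMap, sum_flatMap]
    refine congrArg List.sum (List.map_congr_left ?_)
    intro i _
    rw [List.map_map]
    calc (((PySem.List.pyRange 0 n).filter (fun j => decide (valAt img2 i j ≠ 0))).map
            ((fun cd => if (0 ≤ cd.1 + dx ∧ cd.1 + dx < n ∧ 0 ≤ cd.2 + dy ∧ cd.2 + dy < n ∧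
                valAt img1 (cd.1 + dx) (cd.2 + dy) ≠ 0) then (1 : Nat) else 0) ∘ (fun j => (i, j)))).sum
        = ((PySem.List.pyRange 0 n).filter (fun j => decide (valAt img2 i j ≠ 0))).countP
            (fun j => decide (0 ≤ i + dx ∧ i + dx < n ∧ 0 ≤ j + dy ∧ j + dy < n ∧
              valAt img1 (i + dx) (j + dy) ≠ 0)) := by
          rw [← sum_ite_eq_countP]
          simp only [Function.comp_def, decide_eq_true_eq]
      _ = (PySem.List.pyRange 0 n).countP
            (fun j => decide (0 ≤ i + dx ∧ i + dx < n ∧ 0 ≤ j + dy ∧ j + dy < n ∧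
              valAt img1 (i + dx) (j + dy) ≠ 0) && decide (valAt img2 i j ≠ 0)) := List.countP_filter
      _ = _ := by
          refine List.countP_congr ?_
          intro j _
          simp only [Bool.and_eq_true, decide_eq_true_eq]
          tauto
  rw [hB, Nat.cast_list_sum, List.map_map]
  simp [Function.comp_def]


lemma pix_component (img : List (List Int)) (n : Int) :
    (PySem.List.pyRange 0 n).foldl (fun a i =>
        (PySem.List.pyRange 0 n).foldl (fun a j =>
          if PySem.List.pyGetD (PySem.List.pyGetD img i []) j 0 ≠ 0 then a ++ [(i, j)] else a) a) []
      = pixL img n := by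
  calc (PySem.List.pyRange 0 n).foldl (fun a i =>
        (PySem.List.pyRange 0 n).foldl (fun a j =>
          if PySem.List.pyGetD (PySem.List.pyGetD img i []) j 0 ≠ 0 then a ++ [(i, j)] else a) a) []
      = (PySem.List.pyRange 0 n).foldl (fun a i =>
          a ++ ((PySem.List.pyRange 0 n).filter (fun j => decide (valAt img i j ≠ 0))).map
            (fun j => (i, j))) [] := by
        apply PySem.List.foldl_congr_mem
        intro a i _
        exact PySem.List.foldl_append_ite (fun j => valAt img i j ≠ 0) (fun j => (i, j)) _ a
    _ = pixL img n := by
        rw [PySem.List.foldl_append_eq_flatMap, List.nil_append, pixL]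

lemma pp_eq (img1 img2 : List (List Int)) (n : Int) :
    (PySem.List.pyRange 0 n).foldl (fun p i =>
        (PySem.List.pyRange 0 n).foldl (fun (p : List (Int × Int) × List (Int × Int)) j =>
          ((if PySem.List.pyGetD (PySem.List.pyGetD img1 i []) j 0 ≠ 0 then p.1 ++ [(i, j)] else p.1),
           (if PySem.List.pyGetD (PySem.List.pyGetD img2 i []) j 0 ≠ 0 then p.2 ++ [(i, j)] else p.2))) p)
      ([], [])
      = (pixL img1 n, pixL img2 n) := by
  rw [prod_foldl2 (PySem.List.pyRange 0 n) (PySem.List.pyRange 0 n)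
      (fun a i j => if PySem.List.pyGetD (PySem.List.pyGetD img1 i []) j 0 ≠ 0 then a ++ [(i, j)] else a)
      (fun a i j => if PySem.List.pyGetD (PySem.List.pyGetD img2 i []) j 0 ≠ 0 then a ++ [(i, j)] else a)]
  rw [pix_component, pix_component]

lemma dict_char (p1 p2 : List (Int × Int)) :
    p1.foldl (fun d ab => p2.foldl (fun d cd => d.modify (ab.1 - cd.1, ab.2 - cd.2) 0 (· + 1)) d)
        PySem.Dict.empty
      = PySem.Dict.counter (p1.flatMap (fun ab => p2.map (fun cd => (ab.1 - cd.1, ab.2 - cd.2)))) := by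
  rw [PySem.Dict.counter_eq_foldl, List.foldl_flatMap]
  apply PySem.List.foldl_congr_mem
  intro d ab _
  rw [List.foldl_map]

lemma values_counter (D : List (Int × Int)) :
    (PySem.Dict.counter D).values = (PySem.Set.ofList D).map (fun k => ((D.count k : Nat) : Int)) := by
  show (PySem.Dict.counter D).items.map (fun x => x.2) = _
  rw [PySem.Dict.items_counter, List.map_map]
  simp [Function.comp_def]

-- characterisation of A: the maximum of the per-key multiplicities (0 for no keys)
lemma c_char (img1 img2 : List (List Int)) :
    c img1 img2 =
      (match PySem.List.max?
          ((PySem.Set.ofList (diffsL img1 img2 (img1.length : Int))).map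
            (fun k => ((diffsL img1 img2 (img1.length : Int)).count k : Int))) (fun x => x) with
        | some m => m
        | none => 0) := by
  simp only [c]
  rw [pp_eq img1 img2 (img1.length : Int)]
  rw [show (pixL img1 (img1.length : Int), pixL img2 (img1.length : Int)).1
        = pixL img1 (img1.length : Int) from rfl,
      show (pixL img1 (img1.length : Int), pixL img2 (img1.length : Int)).2
        = pixL img2 (img1.length : Int) from rfl]
  rw [dict_char, values_counter]
  rfl

-- characterisation of B: running maximum of the multiplicities over the translation grid
lemma c_alt_char (img1 img2 : List (List Int)) :
    c_alt img1 img2 =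
      (gridL (img1.length : Int)).foldl
        (fun best k => max best ((diffsL img1 img2 (img1.length : Int)).count k : Int)) 0 := by
  rw [gridL, List.foldl_flatMap]
  simp only [List.foldl_map]
  show (PySem.List.pyRange (-((img1.length : Int) - 1)) (img1.length : Int)).foldl _ 0 = _
  apply PySem.List.foldl_congr_mem
  intro acc dx _
  apply PySem.List.foldl_congr_mem
  intro acc' dy _
  exact congrArg (max acc') (cnt_eq img1 img2 (img1.length : Int) dx dy)

lemma foldl_max_le {α : Type} (G : List α) (f : α → Int) (m a : Int)
    (hm : ∀ k ∈ G, f k ≤ m) (ha : a ≤ m) :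
    G.foldl (fun b k => max b (f k)) a ≤ m := by
  induction G generalizing a with
  | nil => exact ha
  | cons k G ih =>
      simp only [List.foldl_cons]
      apply ih
      · intro k' hk'; exact hm k' (List.mem_cons_of_mem _ hk')
      · exact max_le ha (hm k List.mem_cons_self)

lemma max_eq (D G : List (Int × Int)) (hG : ∀ k ∈ D, k ∈ G) :
    (match PySem.List.max? ((PySem.Set.ofList D).map (fun k => (D.count k : Int))) (fun x => x) with
      | some m => m
      | none => 0)
      = G.foldl (fun best k => max best ((D.count k : Int))) 0 := by
  rcases hD : D with _ | ⟨d, D'⟩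
  · have h0 : PySem.List.max? ((PySem.Set.ofList ([] : List (Int × Int))).map
        (fun k => ((List.count k [] : Nat) : Int))) (fun x => x) = none := by
      rw [PySem.List.max?_eq_none_iff]; rfl
    rw [h0]
    have h1 := (PySem.List.le_foldl_max_int G (fun k => ((List.count k ([] : List (Int × Int)) : Nat) : Int)) 0).1
    have h2 := foldl_max_le G (fun k => ((List.count k ([] : List (Int × Int)) : Nat) : Int)) 0 0
      (fun k _ => by simp) le_rfl
    exact (le_antisymm h2 h1).symm
  · rw [← hD]
    have hne : ((PySem.Set.ofList D).map (fun k => ((D.count k : Nat) : Int))) ≠ [] := by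
      intro h
      have : d ∈ PySem.Set.ofList D := (PySem.Set.mem_ofList D d).mpr (by rw [hD]; exact List.mem_cons_self)
      rw [List.map_eq_nil_iff] at h
      rw [h] at this
      exact absurd this (List.not_mem_nil)
    rcases h : PySem.List.max? ((PySem.Set.ofList D).map (fun k => ((D.count k : Nat) : Int))) (fun x => x) with _ | M
    · exact absurd ((PySem.List.max?_eq_none_iff _ _).mp h) hne
    · have hmem := PySem.List.max?_mem h
      have hmax := PySem.List.max?_isMax h
      obtain ⟨k₀, hk₀S, hk₀M⟩ := List.mem_map.mp hmem
      have hk₀D : k₀ ∈ D := (PySem.Set.mem_ofList D k₀).mp hk₀S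
      have hM0 : 0 ≤ M := by
        rw [← hk₀M]; positivity
      apply le_antisymm
      · exact hk₀M ▸ (PySem.List.le_foldl_max_int G (fun k => ((D.count k : Nat) : Int)) 0).2 k₀ (hG k₀ hk₀D)
      · refine foldl_max_le G (fun k => ((D.count k : Nat) : Int)) M 0 ?_ hM0
        intro k hkG
        by_cases hk : k ∈ D
        · exact hmax _ (List.mem_map.mpr ⟨k, (PySem.Set.mem_ofList D k).mpr hk, rfl⟩)
        · show ((D.count k : Nat) : Int) ≤ M
          rw [List.count_eq_zero_of_not_mem hk]
          exact_mod_cast hM0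

-- ===== VERDICT (by name: the statement is the Claim_ definition above) =====
theorem c_spec : Claim_equal_c := by
  intro img1 img2 _ _
  unfold Spec_c
  rw [c_char, c_alt_char, max_eq _ _ (diffs_mem_grid img1 img2 (img1.length : Int))]
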